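-- pv_equiv track=rewrite | github.com/CrunchyJohnHaven/elastifund | scripts/btc5_policy_benchmark.py | _contiguous_fold_ranges
-- ===== SOURCE A (Python) =====
-- def _contiguous_fold_ranges(length: int, fold_count: int) -> list[tuple[int, int]]:
--     if length <= 0:
--         return []
--     fold_count = max(1, min(int(fold_count), length))
--     base, remainder = divmod(length, fold_count)
--     ranges: list[tuple[int, int]] = []
--     start = 0
--     for index in range(fold_count):
--         size = base + (1 if index < remainder else 0)
--         end = start + size
--         if end > start:
--             ranges.append((start, end))
--         start = end
--     return ranges
-- ===== SOURCE B (Python) =====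
-- def _contiguous_fold_ranges(length: int, fold_count: int) -> list[tuple[int, int]]:
--     if length <= 0:
--         return []
--     fold_count = max(1, min(int(fold_count), length))
--     base, remainder = divmod(length, fold_count)
--     return [
--         (i * base + min(i, remainder), (i + 1) * base + min(i + 1, remainder))
--         for i in range(fold_count)
--     ]
-- ===== Notes on version B (the rewrite author's own statement) =====
-- stated objective: simpler
-- what changed: Replaces the accumulator loop threading a running start (with an end>start guard) by a single comprehension computing each fold's boundaries in closed form: start_i = i*base + min(i, remainder).
import Mathlib
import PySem

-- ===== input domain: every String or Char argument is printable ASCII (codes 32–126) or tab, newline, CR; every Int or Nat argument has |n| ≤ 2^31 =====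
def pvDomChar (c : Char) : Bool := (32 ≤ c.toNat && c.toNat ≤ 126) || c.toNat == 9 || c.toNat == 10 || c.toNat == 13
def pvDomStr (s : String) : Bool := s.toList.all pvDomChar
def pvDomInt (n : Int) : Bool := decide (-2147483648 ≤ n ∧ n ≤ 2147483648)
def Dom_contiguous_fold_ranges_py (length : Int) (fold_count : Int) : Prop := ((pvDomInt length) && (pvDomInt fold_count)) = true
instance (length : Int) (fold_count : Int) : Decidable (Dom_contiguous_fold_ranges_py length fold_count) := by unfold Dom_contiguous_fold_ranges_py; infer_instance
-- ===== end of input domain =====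

-- B replaces A's running-start accumulator loop (with its end>start guard) by a closed-form
-- boundary formula mapped over the fold indices; same cost, simpler derivation.

-- ===== PORT A =====
def contiguous_fold_ranges_py (length : Int) (fold_count : Int) : List (Int × Int) :=
  if length ≤ 0 then []
  else
    let fc := max 1 (min fold_count length)
    let base := PySem.Int.floordiv length fc
    let remainder := PySem.Int.mod length fc
    let st := (PySem.List.pyRange 0 fc 1).foldl
      (fun (s : List (Int × Int) × Int) index =>
        let size := base + (if index < remainder then 1 else 0)
        let e := s.2 + size
        (if e > s.2 then s.1 ++ [(s.2, e)] else s.1, e))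
      (([] : List (Int × Int)), 0)
    st.1

-- ===== PORT B =====
def contiguous_fold_ranges_py_alt (length : Int) (fold_count : Int) : List (Int × Int) :=
  if length ≤ 0 then []
  else
    let fc := max 1 (min fold_count length)
    let base := PySem.Int.floordiv length fc
    let remainder := PySem.Int.mod length fc
    (PySem.List.pyRange 0 fc 1).map
      (fun i => (i * base + min i remainder, (i + 1) * base + min (i + 1) remainder))

-- ===== PRECONDITION & SPEC =====
def Spec_contiguous_fold_ranges_py (length : Int) (fold_count : Int) (out : List (Int × Int)) : Prop := out = contiguous_fold_ranges_py_alt length fold_count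
instance (length : Int) (fold_count : Int) (out : List (Int × Int)) : Decidable (Spec_contiguous_fold_ranges_py length fold_count out) := by unfold Spec_contiguous_fold_ranges_py; infer_instance

-- ===== CLAIM (what is proved, stated in full; the proofs are below) =====
def Claim_equal_contiguous_fold_ranges_py : Prop := ∀ (length : Int) (fold_count : Int), Dom_contiguous_fold_ranges_py length fold_count → Spec_contiguous_fold_ranges_py length fold_count (contiguous_fold_ranges_py length fold_count)

-- ===== LEMMAS AND PROOFS =====

-- closed-form boundary of fold i
def pvG (base remainder i : Int) : Int := i * base + min i remainder

lemma pvG_succ (base remainder i : Int) :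
    pvG base remainder (i + 1) = pvG base remainder i + (base + (if i < remainder then 1 else 0)) := by
  have hmin : min (i + 1) remainder = min i remainder + (if i < remainder then 1 else 0) := by
    split_ifs with h <;> omega
  unfold pvG; rw [hmin]; ring

-- loop invariant: A's accumulator loop from index a with running start pvG a
-- produces the closed-form ranges appended to the accumulator.
lemma pv_loop (base remainder : Int) (hb : 1 ≤ base) :
    ∀ (n : Nat) (a : Int) (acc : List (Int × Int)),
    (PySem.List.pyRange a (a + n) 1).foldl
        (fun (s : List (Int × Int) × Int) index =>
          (if s.2 + (base + (if index < remainder then 1 else 0)) > s.2 then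
              s.1 ++ [(s.2, s.2 + (base + (if index < remainder then 1 else 0)))]
            else s.1,
           s.2 + (base + (if index < remainder then 1 else 0))))
        (acc, pvG base remainder a)
      = (acc ++ (PySem.List.pyRange a (a + n) 1).map
          (fun i => (pvG base remainder i, pvG base remainder (i + 1))),
         pvG base remainder (a + n)) := by
  intro n
  induction n with
  | zero =>
    intro a acc
    rw [PySem.List.pyRange_one_eq_nil (by omega)]
    simp
  | succ n ih =>
    intro a acc
    have hcons : PySem.List.pyRange a (a + (n + 1 : Nat)) 1
        = a :: PySem.List.pyRange (a + 1) (a + (n + 1 : Nat)) 1 :=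
      PySem.List.pyRange_one_cons (by push_cast; omega)
    rw [hcons]
    simp only [List.foldl_cons, List.map_cons]
    have hgt : pvG base remainder a + (base + (if a < remainder then 1 else 0)) > pvG base remainder a := by
      split_ifs <;> omega
    rw [if_pos hgt]
    have harg : a + ((n : Int) + 1) = (a + 1) + (n : Int) := by ring
    have h2 := ih (a + 1) (acc ++ [(pvG base remainder a, pvG base remainder a + (base + (if a < remainder then 1 else 0)))])
    rw [← pvG_succ] at h2 ⊢
    push_cast at h2 ⊢
    rw [harg, h2]
    simp

theorem contiguous_fold_ranges_py_spec' (length fold_count : Int) :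
    contiguous_fold_ranges_py length fold_count = contiguous_fold_ranges_py_alt length fold_count := by
  unfold contiguous_fold_ranges_py contiguous_fold_ranges_py_alt
  split
  · rfl
  · rename_i hpos
    set fc := max 1 (min fold_count length) with hfc
    have hfc1 : 1 ≤ fc := le_max_left _ _
    have hfcle : fc ≤ length := by
      have : 0 < length := by omega
      simp only [hfc]; omega
    have hb : 1 ≤ PySem.Int.floordiv length fc := by
      rw [PySem.Int.le_floordiv_iff_mul_le (by omega)]; omega
    have hr0 : 0 ≤ PySem.Int.mod length fc := PySem.Int.mod_nonneg _ (by omega)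
    have hG0 : pvG (PySem.Int.floordiv length fc) (PySem.Int.mod length fc) 0 = 0 := by
      unfold pvG; omega
    have h := pv_loop (PySem.Int.floordiv length fc) (PySem.Int.mod length fc) hb fc.toNat 0 []
    have e1 : (0 : Int) + (fc.toNat : Int) = fc := by omega
    rw [e1, hG0] at h
    simp only []
    rw [h]
    simp [pvG]

-- ===== VERDICT (by name: the statement is the Claim_ definition above) =====
theorem contiguous_fold_ranges_py_spec : Claim_equal_contiguous_fold_ranges_py := by
  intro length fold_count _
  exact contiguous_fold_ranges_py_spec' length fold_count
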